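-- pv_equiv track=rewrite | github.com/Renu-code123/Codedex-Coding-challenge-March | Day27-Ye Olde Emoticons 📰/Solution.py | emoticons_mood
-- ===== SOURCE A (Python) =====
-- def emoticons_mood(message):
--     happy = [":)", ":p", "XD", ":3", "<3", "\\m/"]
--     sad = [":(", ":'(", "t(-.-t)"]
--     score = 0
--     for emo in happy:
--         score += message.count(emo)
--     for emo in sad:
--         score -= message.count(emo)
--     return score
-- ===== SOURCE B (Python) =====
-- def emoticons_mood(message):
--     # One left-to-right scan over the message: at each index, test each weighted
--     # pattern with startswith and accumulate its weight.  Exact because none of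
--     # the 9 patterns self-overlaps, so per-index counting equals str.count's
--     # non-overlapping totals.
--     patterns = [(":)", 1), (":p", 1), ("XD", 1), (":3", 1), ("<3", 1), ("\\m/", 1),
--                 (":(", -1), (":'(", -1), ("t(-.-t)", -1)]
--     score = 0
--     for i in range(len(message)):
--         for emo, w in patterns:
--             if message.startswith(emo, i):
--                 score += w
--     return score
-- ===== Notes on version B (the rewrite author's own statement) =====
-- stated objective: alternative
-- what changed: Replaced nine separate str.count passes over the message with a single left-to-right scan that tests every pattern with startswith at each index (exact because no pattern self-overlaps).
import Mathlib
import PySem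

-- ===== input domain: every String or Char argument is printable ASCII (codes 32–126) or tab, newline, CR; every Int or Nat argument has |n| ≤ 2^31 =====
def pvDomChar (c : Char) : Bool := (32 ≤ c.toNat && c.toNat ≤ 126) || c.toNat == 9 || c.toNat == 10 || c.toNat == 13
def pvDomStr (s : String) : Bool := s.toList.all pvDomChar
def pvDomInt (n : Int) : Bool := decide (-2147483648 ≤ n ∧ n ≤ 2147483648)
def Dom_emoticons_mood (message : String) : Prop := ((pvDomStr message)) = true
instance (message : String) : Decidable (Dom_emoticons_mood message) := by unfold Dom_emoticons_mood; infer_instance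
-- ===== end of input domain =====

-- B replaces A's nine str.count passes by one left-to-right scan testing each pattern
-- with startswith at every index (objective: alternative single-pass formulation).

-- ===== PORT A =====
-- literal port of A: score += message.count(emo) over happy, score -= message.count(emo) over sad
def emoticons_mood (message : String) : Int :=
  let happy : List String := [":)", ":p", "XD", ":3", "<3", "\\m/"]
  let sad : List String := [":(", ":'(", "t(-.-t)"]
  let score : Int := 0
  let score := happy.foldl (fun sc emo => sc + (PySem.Str.count message emo : Int)) score
  let score := sad.foldl (fun sc emo => sc - (PySem.Str.count message emo : Int)) score
  score

-- ===== PORT B =====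
-- literal port of Source B: for i in range(len(message)), for (emo, w) in patterns,
-- if message.startswith(emo, i): score += w;
-- for 0 ≤ i ≤ len, startswith(emo, i) is exactly the prefix test on the suffix toList.drop i.
def emoticons_mood_alt (message : String) : Int :=
  let patterns : List (String × Int) :=
    [(":)", 1), (":p", 1), ("XD", 1), (":3", 1), ("<3", 1), ("\\m/", 1),
     (":(", -1), (":'(", -1), ("t(-.-t)", -1)]
  (PySem.List.pyRange 0 (PySem.Str.len message) 1).foldl
    (fun score i =>
      patterns.foldl
        (fun sc pw => if PySem.Chars.startswith (message.toList.drop i.toNat) pw.1.toList then sc + pw.2 else sc)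
        score)
    0

-- ===== PRECONDITION & SPEC =====
def Spec_emoticons_mood (message : String) (out : Int) : Prop := out = emoticons_mood_alt message
instance (message : String) (out : Int) : Decidable (Spec_emoticons_mood message out) := by unfold Spec_emoticons_mood; infer_instance

-- ===== CLAIM (what is proved, stated in full; the proofs are below) =====
def Claim_equal_emoticons_mood : Prop := ∀ (message : String), Dom_emoticons_mood message → Spec_emoticons_mood message (emoticons_mood message)

-- ===== LEMMAS AND PROOFS =====

-- overlapping occurrence count: number of suffix positions 0 ≤ j < s.length where p starts
def olCount (p : List Char) : List Char → Nat
  | [] => 0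
  | c :: t => (if p.isPrefixOf (c :: t) then 1 else 0) + olCount p t

-- a pattern with no border cannot restart inside its own occurrence
lemma no_restart (p l : List Char)
    (hb : ∀ j, j < p.length → 0 < j → ¬ (p.drop j <+: p))
    (hpre : p <+: l) (j : Nat) (h0 : 0 < j) (hj : j < p.length) :
    ¬ p.isPrefixOf (l.drop j) := by
  intro hc
  rw [List.isPrefixOf_iff_prefix] at hc
  obtain ⟨r, rfl⟩ := hpre
  rw [List.drop_append_of_le_length (by omega)] at hc
  have h1 : p.drop j <+: p.drop j ++ r := List.prefix_append _ _
  rcases List.prefix_or_prefix_of_prefix hc h1 with h | h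
  · have := h.length_le
    simp [List.length_drop] at this
    omega
  · exact hb j hj h0 h

lemma olCount_drop (p l : List Char)
    (hb : ∀ j, j < p.length → 0 < j → ¬ (p.drop j <+: p))
    (hpre : p <+: l) :
    ∀ k, 0 < k → k ≤ p.length → olCount p (l.drop k) = olCount p (l.drop p.length) := by
  intro k hk0 hk
  obtain ⟨d, hd⟩ : ∃ d, p.length = k + d := ⟨p.length - k, by omega⟩
  clear hk
  induction d generalizing k with
  | zero => simp [hd]
  | succ d ih =>
    have hlen : p.length ≤ l.length := hpre.length_le
    have hne : l.drop k ≠ [] := by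
      intro h
      have := List.length_drop (l := l) (i := k)
      rw [h] at this; simp at this; omega
    obtain ⟨c, t, hct⟩ := List.exists_cons_of_ne_nil hne
    have ht : t = l.drop (k + 1) := by
      have : (l.drop k).tail = l.drop (k + 1) := by
        rw [List.tail_drop]
      rw [hct] at this; simpa using this
    rw [hct, olCount]
    have hnp : ¬ p.isPrefixOf (c :: t) := by
      rw [← hct]
      exact no_restart p l hb hpre k hk0 (by omega)
    rw [if_neg hnp, ht]
    have := ih (k + 1) (by omega) (by omega)
    simpa using this

lemma countgo_eq (p : List Char)
    (hp : p ≠ [])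
    (hb : ∀ j, j < p.length → 0 < j → ¬ (p.drop j <+: p)) :
    ∀ (fuel : Nat) (l : List Char) (acc : Nat), l.length ≤ fuel →
      PySem.Chars.count.go p fuel l acc = acc + olCount p l := by
  intro fuel
  induction fuel with
  | zero =>
    intro l acc hl
    have : l = [] := List.eq_nil_of_length_eq_zero (by omega)
    subst this
    simp [PySem.Chars.count.go, olCount]
  | succ n ih =>
    intro l acc hl
    cases l with
    | nil => simp [PySem.Chars.count.go, olCount]
    | cons c t =>
      rw [PySem.Chars.count.go]
      by_cases hpre : p.isPrefixOf (c :: t)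
      · rw [if_pos hpre]
        have hplen : 0 < p.length := by cases p <;> simp_all
        have hlen2 : ((c :: t).drop p.length).length ≤ n := by
          simp only [List.length_drop, List.length_cons]
          simp only [List.length_cons] at hl
          omega
        rw [ih _ _ hlen2]
        have hpre' : p <+: (c :: t) := List.isPrefixOf_iff_prefix.mp hpre
        have holc : olCount p (c :: t) = 1 + olCount p ((c :: t).drop p.length) := by
          rw [olCount, if_pos hpre]
          congr 1
          have := olCount_drop p (c :: t) hb hpre' 1 (by omega) (by omega)
          simpa using this
        omega
      · rw [if_neg hpre]
        have : t.length ≤ n := by simp at hl; omega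
        rw [ih _ _ this]
        rw [olCount, if_neg hpre]
        omega

-- count = overlapping count for a borderless nonempty pattern
lemma count_eq_olCount (p s : List Char)
    (hp : p ≠ [])
    (hb : ∀ j, j < p.length → 0 < j → ¬ (p.drop j <+: p)) :
    PySem.Chars.count s p = olCount p s := by
  rw [PySem.Chars.count]
  rw [if_neg (by simpa using hp)]
  simpa using countgo_eq p hp hb s.length s 0 le_rfl

-- per-position score of B's inner loops
def gStep (s : List Char) : Int :=
  (if (":)".toList).isPrefixOf s then 1 else 0) + (if (":p".toList).isPrefixOf s then 1 else 0)
  + (if ("XD".toList).isPrefixOf s then 1 else 0) + (if (":3".toList).isPrefixOf s then 1 else 0)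
  + (if ("<3".toList).isPrefixOf s then 1 else 0) + (if ("\\m/".toList).isPrefixOf s then 1 else 0)
  - (if (":(".toList).isPrefixOf s then 1 else 0) - (if (":'(".toList).isPrefixOf s then 1 else 0)
  - (if ("t(-.-t)".toList).isPrefixOf s then 1 else 0)

lemma sum_gStep (s : List Char) :
    ((List.range s.length).map (fun i => gStep (s.drop i))).sum
      = (olCount ":)".toList s : Int) + (olCount ":p".toList s : Int)
        + (olCount "XD".toList s : Int) + (olCount ":3".toList s : Int)
        + (olCount "<3".toList s : Int) + (olCount "\\m/".toList s : Int)
        - (olCount ":(".toList s : Int) - (olCount ":'(".toList s : Int)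
        - (olCount "t(-.-t)".toList s : Int) := by
  induction s with
  | nil => simp [olCount]
  | cons c t ih =>
    rw [List.length_cons, List.range_succ_eq_map]
    simp only [List.map_cons, List.map_map, List.sum_cons]
    have hcomp : ((List.range t.length).map (fun i => gStep ((c :: t).drop (i + 1)))).sum
        = ((List.range t.length).map (fun i => gStep (t.drop i))).sum := by
      congr 1
    simp only [Function.comp_def, List.drop_zero] at *
    rw [hcomp, ih]
    simp only [olCount, gStep]
    simp only [Nat.cast_add, Nat.cast_ite, Nat.cast_one, Nat.cast_zero]
    ring

lemma ite_add_w (P : Prop) [Decidable P] (sc w : Int) :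
    (if P then sc + w else sc) = sc + (if P then w else 0) := by split_ifs <;> ring

-- B's inner pattern loop at one position computes gStep
lemma stepB (s : List Char) (score : Int) :
    ([(":)", 1), (":p", 1), ("XD", 1), (":3", 1), ("<3", 1), ("\\m/", 1),
      (":(", -1), (":'(", -1), ("t(-.-t)", -1)] : List (String × Int)).foldl
        (fun sc pw => if PySem.Chars.startswith s pw.1.toList then sc + pw.2 else sc) score
      = score + gStep s := by
  simp only [List.foldl, PySem.Chars.startswith, gStep, ite_add_w]
  split_ifs <;> omega

lemma A_eq (message : String) :
    emoticons_mood message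
      = (0 : Int) + (olCount ":)".toList message.toList : Int) + (olCount ":p".toList message.toList : Int)
        + (olCount "XD".toList message.toList : Int) + (olCount ":3".toList message.toList : Int)
        + (olCount "<3".toList message.toList : Int) + (olCount "\\m/".toList message.toList : Int)
        - (olCount ":(".toList message.toList : Int) - (olCount ":'(".toList message.toList : Int)
        - (olCount "t(-.-t)".toList message.toList : Int) := by
  simp only [emoticons_mood, List.foldl, PySem.Str.count]
  rw [count_eq_olCount ":)".toList message.toList (by decide) (by decide),
      count_eq_olCount ":p".toList message.toList (by decide) (by decide),
      count_eq_olCount "XD".toList message.toList (by decide) (by decide),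
      count_eq_olCount ":3".toList message.toList (by decide) (by decide),
      count_eq_olCount "<3".toList message.toList (by decide) (by decide),
      count_eq_olCount "\\m/".toList message.toList (by decide) (by decide),
      count_eq_olCount ":(".toList message.toList (by decide) (by decide),
      count_eq_olCount ":'(".toList message.toList (by decide) (by decide),
      count_eq_olCount "t(-.-t)".toList message.toList (by decide) (by decide)]

lemma B_eq (message : String) :
    emoticons_mood_alt message
      = (0 : Int) + (olCount ":)".toList message.toList : Int) + (olCount ":p".toList message.toList : Int)
        + (olCount "XD".toList message.toList : Int) + (olCount ":3".toList message.toList : Int)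
        + (olCount "<3".toList message.toList : Int) + (olCount "\\m/".toList message.toList : Int)
        - (olCount ":(".toList message.toList : Int) - (olCount ":'(".toList message.toList : Int)
        - (olCount "t(-.-t)".toList message.toList : Int) := by
  simp only [emoticons_mood_alt]
  rw [PySem.Str.len_eq, PySem.List.pyRange_zero_nat, List.foldl_map]
  rw [PySem.List.foldl_congr_mem (List.range message.toList.length) _
        (fun (x : Int) (y : Nat) => x + gStep (List.drop ((y : Int)).toNat message.toList)) 0
        (fun acc y _ => stepB (List.drop ((y : Int)).toNat message.toList) acc)]
  simp only [Int.toNat_natCast]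
  rw [PySem.List.foldl_add]
  rw [sum_gStep message.toList]
  ring

-- ===== VERDICT (by name: the statement is the Claim_ definition above) =====
theorem emoticons_mood_spec : Claim_equal_emoticons_mood := by
  intro message _
  unfold Spec_emoticons_mood
  rw [A_eq, B_eq]
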